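-- pv_equiv track=rewrite | github.com/caork/AtlasNER | src/atlas_ner/data/schemes.py | spans_to_tags
-- ===== SOURCE A (Python) =====
-- def spans_to_tags(
--     spans: list[tuple[str, int, int]],
--     length: int,
--     scheme: str,
-- ) -> list[str]:
--     scheme = scheme.upper()
--     tags = ["O"] * length
--     for entity_type, start, end in spans:
--         if end - start <= 0:
--             continue
--         if scheme == "BIO":
--             tags[start] = f"B-{entity_type}"
--             for index in range(start + 1, end):
--                 tags[index] = f"I-{entity_type}"
--             continue
--         if scheme == "BIOES":
--             span_len = end - start
--             if span_len == 1:
--                 tags[start] = f"S-{entity_type}"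
--             else:
--                 tags[start] = f"B-{entity_type}"
--                 for index in range(start + 1, end - 1):
--                     tags[index] = f"I-{entity_type}"
--                 tags[end - 1] = f"E-{entity_type}"
--             continue
--         raise ValueError(f"Unsupported scheme: {scheme}")
--     return tags
-- ===== SOURCE B (Python) =====
-- def _label(scheme, entity_type, start, end, p):
--     """Tag for position p of the span [start, end) under a BIO/BIOES scheme."""
--     if scheme == "BIO":
--         return ("B-" if p == start else "I-") + entity_type
--     # BIOES
--     if end - start == 1:
--         return "S-" + entity_type
--     if p == start:
--         return "B-" + entity_type
--     if p == end - 1: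
--         return "E-" + entity_type
--     return "I-" + entity_type
--
--
-- def spans_to_tags(spans, length, scheme):
--     """Label each position by the last positive-length span covering it."""
--     scheme = scheme.upper()
--     covering = [sp for sp in spans if sp[2] - sp[1] > 0][::-1]
--
--     def tag_at(p):
--         for entity_type, start, end in covering:
--             if start <= p < end:
--                 return _label(scheme, entity_type, start, end, p)
--         return "O"
--
--     return [tag_at(p) for p in range(length)]
-- ===== Notes on version B (the rewrite author's own statement) =====
-- stated objective: alternative
-- what changed: Replaces A's per-span in-place writes into a mutable tag array by a per-position lookup: B filters the positive-length spans once, then labels each position from the last such span covering it, using the position's relation to the span's boundaries; Pre_ excludes the inputs where A raises (IndexError/ValueError) and the positive-length spans with a negative start, on which A's value comes only from Python's accidental negative-index wraparound.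
-- outside the precondition, e.g. on spans_to_tags([('X', -1, 1)], 2, 'BIO'): A returns ['I-X', 'B-X'], B returns ['I-X', 'O']
import Mathlib
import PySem

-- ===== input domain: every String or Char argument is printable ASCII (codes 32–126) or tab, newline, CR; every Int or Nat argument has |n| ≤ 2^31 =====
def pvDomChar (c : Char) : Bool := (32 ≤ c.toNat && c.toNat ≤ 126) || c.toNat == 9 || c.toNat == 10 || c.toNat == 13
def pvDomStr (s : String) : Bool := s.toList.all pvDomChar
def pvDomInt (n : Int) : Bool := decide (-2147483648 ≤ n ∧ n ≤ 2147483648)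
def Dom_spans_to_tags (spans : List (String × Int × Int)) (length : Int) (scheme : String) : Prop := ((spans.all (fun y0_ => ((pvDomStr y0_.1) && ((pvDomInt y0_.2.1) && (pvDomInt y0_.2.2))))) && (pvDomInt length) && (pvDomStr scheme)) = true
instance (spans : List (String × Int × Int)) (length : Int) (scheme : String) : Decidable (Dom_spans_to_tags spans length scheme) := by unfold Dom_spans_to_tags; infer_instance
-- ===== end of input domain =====

-- B replaces A's per-span writes into a mutable tag list by a single per-position
-- lookup of the last positive-length covering span (alternative decomposition, similar cost).

-- ===== PORT A =====
-- Python's `tags[i] = v`, including negative-index wraparound; a genuinely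
-- out-of-range index (IndexError in Python, excluded by Pre_spans_to_tags) is a no-op here.
def pySetStr (tags : List String) (i : Int) (v : String) : List String :=
  if 0 ≤ i ∧ i < (tags.length : Int) then tags.set i.toNat v
  else if -(tags.length : Int) ≤ i ∧ i < 0 then tags.set ((tags.length : Int) + i).toNat v
  else tags

def spans_to_tags (spans : List (String × Int × Int)) (length : Int) (scheme : String) : List String :=
  let scheme := PySem.Str.upper scheme
  let tags : List String := List.replicate length.toNat "O"
  spans.foldl (fun tags sp =>
    let entity_type := sp.1
    let start := sp.2.1
    let stop := sp.2.2
    if stop - start ≤ 0 then tags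
    else if scheme = "BIO" then
      let tags := pySetStr tags start ("B-" ++ entity_type)
      (PySem.List.pyRange (start + 1) stop 1).foldl
        (fun tags index => pySetStr tags index ("I-" ++ entity_type)) tags
    else if scheme = "BIOES" then
      if stop - start = 1 then pySetStr tags start ("S-" ++ entity_type)
      else
        let tags := pySetStr tags start ("B-" ++ entity_type)
        let tags := (PySem.List.pyRange (start + 1) (stop - 1) 1).foldl
          (fun tags index => pySetStr tags index ("I-" ++ entity_type)) tags
        pySetStr tags (stop - 1) ("E-" ++ entity_type)
    else tags  -- Python raises ValueError here; such inputs are outside Pre_spans_to_tags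
  ) tags

-- ===== PORT B =====
def pvLabel (sch entity_type : String) (start stop p : Int) : String :=
  if sch = "BIO" then (if p = start then "B-" else "I-") ++ entity_type
  else if stop - start = 1 then "S-" ++ entity_type
  else if p = start then "B-" ++ entity_type
  else if p = stop - 1 then "E-" ++ entity_type
  else "I-" ++ entity_type

def pvTagAt (sch : String) (rev : List (String × Int × Int)) (p : Int) : String :=
  match rev with
  | [] => "O"
  | (t, s, e) :: rest => if s ≤ p ∧ p < e then pvLabel sch t s e p else pvTagAt sch rest p

def spans_to_tags_alt (spans : List (String × Int × Int)) (length : Int) (scheme : String) : List String :=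
  let sch := PySem.Str.upper scheme
  let covering := (spans.filter (fun sp => 0 < sp.2.2 - sp.2.1)).reverse
  (PySem.List.pyRange 0 length 1).map (fun p => pvTagAt sch covering p)

-- ===== PRECONDITION & SPEC =====
-- Pre_ excludes exactly the inputs where A raises (IndexError on an out-of-range
-- index of a positive-length span, ValueError on an unsupported scheme with a
-- positive-length span) and the positive-length spans with a negative start, on
-- which A returns a value only by Python's accidental negative-index wraparound.
def Pre_spans_to_tags (spans : List (String × Int × Int)) (length : Int) (scheme : String) : Prop :=
  (∀ sp ∈ spans, 0 < sp.2.2 - sp.2.1 → 0 ≤ sp.2.1 ∧ sp.2.2 ≤ length) ∧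
  (PySem.Str.upper scheme = "BIO" ∨ PySem.Str.upper scheme = "BIOES" ∨
    ∀ sp ∈ spans, sp.2.2 - sp.2.1 ≤ 0)
instance (spans : List (String × Int × Int)) (length : Int) (scheme : String) : Decidable (Pre_spans_to_tags spans length scheme) := by unfold Pre_spans_to_tags; infer_instance

def pvWitness_spans_to_tags : (List (String × Int × Int)) × Int × String :=
  ([("PER", 0, 2), ("LOC", 3, 4), ("X", 2, 2)], 5, "bioes")

def Spec_spans_to_tags (spans : List (String × Int × Int)) (length : Int) (scheme : String) (out : List String) : Prop := out = spans_to_tags_alt spans length scheme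
instance (spans : List (String × Int × Int)) (length : Int) (scheme : String) (out : List String) : Decidable (Spec_spans_to_tags spans length scheme out) := by unfold Spec_spans_to_tags; infer_instance

-- ===== CLAIM (what is proved, stated in full; the proofs are below) =====
def Claim_equal_spans_to_tags : Prop := ∀ (spans : List (String × Int × Int)) (length : Int) (scheme : String), Dom_spans_to_tags spans length scheme → Pre_spans_to_tags spans length scheme → Spec_spans_to_tags spans length scheme (spans_to_tags spans length scheme)

-- ===== LEMMAS AND PROOFS =====

theorem pySetStr_length (tags : List String) (i : Int) (v : String) :
    (pySetStr tags i v).length = tags.length := by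
  unfold pySetStr; split
  · simp
  · split <;> simp

theorem pySetStr_getD (tags : List String) (i : Int) (v : String)
    (h0 : 0 ≤ i) (h1 : i < (tags.length : Int)) (p : Nat) :
    (pySetStr tags i v).getD p "" = if (p : Int) = i then v else tags.getD p "" := by
  unfold pySetStr
  rw [if_pos ⟨h0, h1⟩]
  by_cases hpi : (p : Int) = i
  · rw [if_pos hpi]
    have hp : i.toNat = p := by omega
    have hlt : p < tags.length := by omega
    rw [hp]
    simp [List.getD, hlt]
  · rw [if_neg hpi]
    have hne : i.toNat ≠ p := by omega
    simp [List.getD, List.getElem?_set_ne hne]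

-- result of the constant-value range-fill loop, pointwise
theorem rangeFill_spec (v : String) :
    ∀ (n : Nat) (a b : Int) (tags : List String), (b - a).toNat = n → 0 ≤ a →
      b ≤ (tags.length : Int) →
      ((PySem.List.pyRange a b 1).foldl (fun tg i => pySetStr tg i v) tags).length = tags.length ∧
      ∀ p : Nat,
        ((PySem.List.pyRange a b 1).foldl (fun tg i => pySetStr tg i v) tags).getD p "" =
          if a ≤ (p : Int) ∧ (p : Int) < b then v else tags.getD p "" := by
  intro n
  induction n with
  | zero =>
    intro a b tags hn _ _
    have hba : b ≤ a := by omega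
    rw [PySem.List.pyRange_one_eq_nil hba]
    refine ⟨rfl, fun p => ?_⟩
    rw [if_neg (by omega)]
    simp
  | succ m ih =>
    intro a b tags hn ha hb
    have hab : a < b := by omega
    rw [PySem.List.pyRange_one_cons hab]
    simp only [List.foldl_cons]
    have hlen : (pySetStr tags a v).length = tags.length := pySetStr_length tags a v
    obtain ⟨ihlen, ihget⟩ := ih (a + 1) b (pySetStr tags a v) (by omega) (by omega)
      (by rw [hlen]; exact hb)
    refine ⟨by rw [ihlen, hlen], fun p => ?_⟩
    rw [ihget p, pySetStr_getD tags a v ha (by omega) p]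
    by_cases hpa : (p : Int) = a
    · rw [if_neg (by omega), if_pos hpa, if_pos (by omega)]
    · by_cases hcov : a + 1 ≤ (p : Int) ∧ (p : Int) < b
      · rw [if_pos hcov, if_pos (by omega)]
      · rw [if_neg hcov, if_neg hpa, if_neg (by omega)]

-- the per-position effect of processing the span list, as a fold
def pvCoverStep (sch : String) (p : Int) (acc : String) (sp : String × Int × Int) : String :=
  if 0 < sp.2.2 - sp.2.1 ∧ sp.2.1 ≤ p ∧ p < sp.2.2 then pvLabel sch sp.1 sp.2.1 sp.2.2 p else acc

-- B's first-match-in-reverse lookup equals the last-wins fold over the span list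
theorem tagAt_eq_foldl (sch : String) (p : Int) (spans : List (String × Int × Int)) :
    pvTagAt sch ((spans.filter (fun sp => 0 < sp.2.2 - sp.2.1)).reverse) p =
      spans.foldl (pvCoverStep sch p) "O" := by
  induction spans using List.reverseRecOn with
  | nil => simp [pvTagAt]
  | append_singleton l x ihl =>
    rcases x with ⟨t, s, e⟩
    rw [List.filter_append, List.foldl_append, List.reverse_append]
    by_cases hv : 0 < e - s
    · simp only [List.filter_cons, List.filter_nil, decide_eq_true_eq]
      rw [if_pos hv]
      simp only [List.reverse_cons, List.reverse_nil, List.nil_append, List.singleton_append,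
        List.foldl_cons, List.foldl_nil]
      by_cases hc : s ≤ p ∧ p < e
      · simp only [pvTagAt, pvCoverStep]
        rw [if_pos hc, if_pos ⟨hv, hc⟩]
      · simp only [pvTagAt, pvCoverStep]
        rw [if_neg hc, ihl, if_neg (by rintro ⟨_, h2, h3⟩; exact hc ⟨h2, h3⟩)]
    · simp only [List.filter_cons, List.filter_nil, decide_eq_true_eq]
      rw [if_neg hv]
      simp only [List.reverse_nil, List.nil_append, List.foldl_cons, List.foldl_nil, pvCoverStep]
      rw [if_neg (by rintro ⟨h1, _⟩; exact hv h1), ihl]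

-- the per-span step of A's loop, named for the proofs (defeq to the lambda in the port)
def pvStepA (sch : String) (tags : List String) (sp : String × Int × Int) : List String :=
  if sp.2.2 - sp.2.1 ≤ 0 then tags
  else if sch = "BIO" then
    (PySem.List.pyRange (sp.2.1 + 1) sp.2.2 1).foldl
      (fun tags index => pySetStr tags index ("I-" ++ sp.1)) (pySetStr tags sp.2.1 ("B-" ++ sp.1))
  else if sch = "BIOES" then
    if sp.2.2 - sp.2.1 = 1 then pySetStr tags sp.2.1 ("S-" ++ sp.1)
    else pySetStr ((PySem.List.pyRange (sp.2.1 + 1) (sp.2.2 - 1) 1).foldl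
        (fun tags index => pySetStr tags index ("I-" ++ sp.1)) (pySetStr tags sp.2.1 ("B-" ++ sp.1)))
      (sp.2.2 - 1) ("E-" ++ sp.1)
  else tags

theorem spans_to_tags_eq_foldl (spans : List (String × Int × Int)) (length : Int) (scheme : String) :
    spans_to_tags spans length scheme =
      spans.foldl (pvStepA (PySem.Str.upper scheme)) (List.replicate length.toNat "O") := rfl

theorem rangeFold_length (v : String) (r : List Int) (tags : List String) :
    (r.foldl (fun tg i => pySetStr tg i v) tags).length = tags.length := by
  induction r generalizing tags with
  | nil => rfl
  | cons x r ih => simp only [List.foldl_cons]; rw [ih, pySetStr_length]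

theorem pvStepA_length (sch : String) (tags : List String) (sp : String × Int × Int) :
    (pvStepA sch tags sp).length = tags.length := by
  unfold pvStepA
  split_ifs <;> simp [rangeFold_length, pySetStr_length]

theorem pvStepA_getD (sch : String) (tags : List String) (sp : String × Int × Int)
    (hp : 0 < sp.2.2 - sp.2.1 → 0 ≤ sp.2.1 ∧ sp.2.2 ≤ (tags.length : Int))
    (hs : sch = "BIO" ∨ sch = "BIOES" ∨ sp.2.2 - sp.2.1 ≤ 0) (p : Nat) :
    (pvStepA sch tags sp).getD p "" = pvCoverStep sch p (tags.getD p "") sp := by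
  rcases sp with ⟨t, s, e⟩
  dsimp only at hp hs
  simp only [pvStepA, pvCoverStep]
  by_cases hv : e - s ≤ 0
  · rw [if_pos hv, if_neg (by omega)]
  · rw [if_neg hv]
    obtain ⟨hs0, hsl⟩ := hp (by omega)
    rcases hs with hBIO | hBIOES | hinv
    · -- BIO
      subst hBIO
      rw [if_pos rfl]
      obtain ⟨-, hfill⟩ := rangeFill_spec ("I-" ++ t) (e - (s + 1)).toNat (s + 1) e
        (pySetStr tags s ("B-" ++ t)) rfl (by omega) (by rw [pySetStr_length]; exact hsl)
      rw [hfill p, pySetStr_getD tags s ("B-" ++ t) hs0 (by omega) p]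
      rw [show pvLabel "BIO" t s e ↑p = (if (p : Int) = s then "B-" else "I-") ++ t from by
        simp [pvLabel]]
      by_cases hps : (p : Int) = s
      · rw [if_neg (by omega), if_pos hps, if_pos (by omega), if_pos hps]
      · by_cases hmid : s + 1 ≤ (p : Int) ∧ (p : Int) < e
        · rw [if_pos hmid, if_pos (by omega), if_neg hps]
        · rw [if_neg hmid, if_neg hps, if_neg (by omega)]
    · -- BIOES
      subst hBIOES
      rw [if_neg (show ¬("BIOES" = "BIO") by decide), if_pos rfl]
      by_cases h1 : e - s = 1
      · rw [if_pos h1, pySetStr_getD tags s ("S-" ++ t) hs0 (by omega) p]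
        rw [show pvLabel "BIOES" t s e ↑p = "S-" ++ t from by simp [pvLabel, h1]]
        by_cases hps : (p : Int) = s
        · rw [if_pos hps, if_pos (by omega)]
        · rw [if_neg hps, if_neg (by omega)]
      · rw [if_neg h1]
        have hmidlen : ((PySem.List.pyRange (s + 1) (e - 1) 1).foldl
            (fun tags index => pySetStr tags index ("I-" ++ t))
            (pySetStr tags s ("B-" ++ t))).length = tags.length := by
          rw [rangeFold_length, pySetStr_length]
        rw [pySetStr_getD _ (e - 1) ("E-" ++ t) (by omega) (by rw [hmidlen]; omega) p]
        obtain ⟨-, hfill⟩ := rangeFill_spec ("I-" ++ t) ((e - 1) - (s + 1)).toNat (s + 1) (e - 1)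
          (pySetStr tags s ("B-" ++ t)) rfl (by omega) (by rw [pySetStr_length]; omega)
        rw [hfill p, pySetStr_getD tags s ("B-" ++ t) hs0 (by omega) p]
        rw [show pvLabel "BIOES" t s e ↑p =
            (if (p : Int) = s then "B-" ++ t else if (p : Int) = e - 1 then "E-" ++ t
              else "I-" ++ t) from by simp [pvLabel, h1]]
        by_cases hpe : (p : Int) = e - 1
        · rw [if_pos hpe, if_pos (by omega), if_neg (by omega), if_pos hpe]
        · rw [if_neg hpe]
          by_cases hps : (p : Int) = s
          · rw [if_neg (by omega), if_pos hps, if_pos (by omega), if_pos hps]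
          · by_cases hmid : s + 1 ≤ (p : Int) ∧ (p : Int) < e - 1
            · rw [if_pos hmid, if_pos (by omega), if_neg hps, if_neg hpe]
            · rw [if_neg hmid, if_neg hps, if_neg (by omega)]
    · omega

-- A's whole loop, pointwise
theorem A_fold_spec (sch : String) (l : List (String × Int × Int)) (tags : List String)
    (hp : ∀ sp ∈ l, 0 < sp.2.2 - sp.2.1 → 0 ≤ sp.2.1 ∧ sp.2.2 ≤ (tags.length : Int))
    (hs : sch = "BIO" ∨ sch = "BIOES" ∨ ∀ sp ∈ l, sp.2.2 - sp.2.1 ≤ 0) :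
    (l.foldl (pvStepA sch) tags).length = tags.length ∧
    ∀ p : Nat, (l.foldl (pvStepA sch) tags).getD p "" =
      l.foldl (pvCoverStep sch p) (tags.getD p "") := by
  induction l generalizing tags with
  | nil => exact ⟨rfl, fun _ => rfl⟩
  | cons sp l ih =>
    simp only [List.foldl_cons]
    have hlen : (pvStepA sch tags sp).length = tags.length := pvStepA_length sch tags sp
    have hp' : ∀ x ∈ l, 0 < x.2.2 - x.2.1 → 0 ≤ x.2.1 ∧ x.2.2 ≤ ((pvStepA sch tags sp).length : Int) := by
      intro x hx hvx
      rw [hlen]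
      exact hp x (List.mem_cons_of_mem sp hx) hvx
    have hs' : sch = "BIO" ∨ sch = "BIOES" ∨ ∀ x ∈ l, x.2.2 - x.2.1 ≤ 0 := by
      rcases hs with h | h | h
      · exact Or.inl h
      · exact Or.inr (Or.inl h)
      · exact Or.inr (Or.inr fun x hx => h x (List.mem_cons_of_mem sp hx))
    obtain ⟨ihlen, ihget⟩ := ih (pvStepA sch tags sp) hp' hs'
    refine ⟨by rw [ihlen, hlen], fun p => ?_⟩
    rw [ihget p, pvStepA_getD sch tags sp (hp sp (List.mem_cons_self ..)) ?_ p]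
    rcases hs with h | h | h
    · exact Or.inl h
    · exact Or.inr (Or.inl h)
    · exact Or.inr (Or.inr (h sp (List.mem_cons_self ..)))

-- ===== VERDICT (by name: the statement is the Claim_ definition above) =====
theorem spans_to_tags_spec : Claim_equal_spans_to_tags := by
  unfold Claim_equal_spans_to_tags
  intro spans length scheme _ hpre
  unfold Spec_spans_to_tags
  obtain ⟨hp, hs⟩ := hpre
  have hp' : ∀ sp ∈ spans, 0 < sp.2.2 - sp.2.1 →
      0 ≤ sp.2.1 ∧ sp.2.2 ≤ ((List.replicate length.toNat "O").length : Int) := by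
    intro sp hmem hv
    obtain ⟨h1, h2⟩ := hp sp hmem hv
    refine ⟨h1, ?_⟩
    simp only [List.length_replicate]
    omega
  obtain ⟨hAlen, hAget⟩ := A_fold_spec (PySem.Str.upper scheme) spans
    (List.replicate length.toNat "O") hp' hs
  rw [spans_to_tags_eq_foldl]
  show spans.foldl (pvStepA (PySem.Str.upper scheme)) (List.replicate length.toNat "O") =
    (PySem.List.pyRange 0 length 1).map
      (fun p => pvTagAt (PySem.Str.upper scheme)
        ((spans.filter (fun sp => 0 < sp.2.2 - sp.2.1)).reverse) p)
  have hlen : (spans.foldl (pvStepA (PySem.Str.upper scheme)) (List.replicate length.toNat "O")).length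
      = ((PySem.List.pyRange 0 length 1).map
          (fun p => pvTagAt (PySem.Str.upper scheme)
            ((spans.filter (fun sp => 0 < sp.2.2 - sp.2.1)).reverse) p)).length := by
    rw [hAlen, List.length_map, PySem.List.length_pyRange_one]
    simp
  apply List.ext_getElem hlen
  intro k hk1 hk2
  have hkL : k < length.toNat := by
    rw [hAlen, List.length_replicate] at hk1
    exact hk1
  rw [← List.getD_eq_getElem _ "" hk1, hAget k]
  have hrepl : (List.replicate length.toNat "O").getD k "" = "O" := by
    rw [List.getD_eq_getElem _ "" (by simpa using hkL)]
    simp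
  rw [hrepl, ← tagAt_eq_foldl]
  rw [List.getElem_map]
  congr 1
  rw [PySem.List.getElem_pyRange_one]
  omega
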